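-- pv_equiv track=rewrite | github.com/zionia4758/programmers | level3/숫자 게임.py | solution
-- ===== SOURCE A (Python) =====
-- def solution(A, B):
--     A.sort()
--     B.sort()
--     answer = 0
--     for a in A:
--         while True:
--             b=B.pop(0)
--             if b>a:
--                 answer+=1
--                 break
--             if len(B)==0:
--                 break
--         if len(B)==0:
--             break
--
--     return answer
-- ===== SOURCE B (Python) =====
-- def solution(A, B):
--     # Loop over sorted B with an index into sorted A: each b is matched to the
--     # smallest unmatched a it beats, otherwise discarded. No inner loop, no pops.
--     A = sorted(A)
--     B = sorted(B)
--     i = 0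
--     n = len(A)
--     answer = 0
--     for b in B:
--         if i < n and b > A[i]:
--             answer += 1
--             i += 1
--     return answer
-- ===== Notes on version B (the rewrite author's own statement) =====
-- stated objective: faster
-- what changed: Instead of A's per-element inner while loop that repeatedly pops B from the front (each pop(0) shifting the whole list), B makes a single pass over sorted B with one advancing index into sorted A, matching each b against the smallest unmatched a.
import Mathlib
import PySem

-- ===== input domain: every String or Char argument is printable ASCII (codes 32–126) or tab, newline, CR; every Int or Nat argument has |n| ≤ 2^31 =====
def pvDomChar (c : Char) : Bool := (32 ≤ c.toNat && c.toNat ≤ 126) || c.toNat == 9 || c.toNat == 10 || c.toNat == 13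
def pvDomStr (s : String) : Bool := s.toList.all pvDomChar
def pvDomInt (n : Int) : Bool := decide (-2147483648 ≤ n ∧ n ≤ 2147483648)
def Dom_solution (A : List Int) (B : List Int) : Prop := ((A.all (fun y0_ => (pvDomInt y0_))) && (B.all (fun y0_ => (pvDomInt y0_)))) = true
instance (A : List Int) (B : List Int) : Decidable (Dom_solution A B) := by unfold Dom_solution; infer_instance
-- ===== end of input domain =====

-- B replaces A's per-a inner while loop popping B from the front with one pass over sorted B and an index into sorted A (asymptotically faster).
-- A sorts both arguments in place and pops from B; B does not mutate — the equivalence proved is about the RETURN value only.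


-- ===== PORT A =====
-- inner 'while True' loop: pop b from the front of B; if b > a count and break;
-- if B became empty break. Returns (answer, remaining B).
-- (On empty B Python raises IndexError — excluded by Pre_solution; the port returns (answer, []).)
def solInner (a : Int) : List Int → Int → Int × List Int
  | [], answer => (answer, [])
  | b :: rest, answer =>
    if b > a then (answer + 1, rest)
    else if rest = [] then (answer, [])
    else solInner a rest answer

-- outer 'for a in A' loop with the 'if len(B)==0: break'
def solOuter : List Int → List Int → Int → Int
  | [], _, answer => answer
  | a :: as, B, answer =>
    let r := solInner a B answer
    if r.2 = [] then r.1 else solOuter as r.2 r.1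

def solution (A : List Int) (B : List Int) : Int :=
  solOuter (PySem.List.sorted A (fun x => x) false) (PySem.List.sorted B (fun x => x) false) 0

-- ===== PORT B =====
-- the 'for b in B' loop of Source B; the suffix of A from index i stands for the index i
def altLoop : List Int → List Int → Int → Int
  | _, [], answer => answer
  | as, b :: bs, answer =>
    match as with
    | [] => altLoop [] bs answer            -- i == n: the loop body does nothing
    | a :: as' =>
      if b > a then altLoop as' bs (answer + 1) else altLoop (a :: as') bs answer

def solution_alt (A : List Int) (B : List Int) : Int :=
  altLoop (PySem.List.sorted A (fun x => x) false) (PySem.List.sorted B (fun x => x) false) 0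

-- ===== PRECONDITION & SPEC =====
-- Pre_ excludes exactly the inputs where A raises IndexError: nonempty A with empty B (B.pop(0) on []).
def Pre_solution (A : List Int) (B : List Int) : Prop := A = [] ∨ B ≠ []
instance (A : List Int) (B : List Int) : Decidable (Pre_solution A B) := by unfold Pre_solution; infer_instance
def pvWitness_solution : List Int × List Int := ([1, 3, 2], [2, 1, 4])

def Spec_solution (A : List Int) (B : List Int) (out : Int) : Prop := out = solution_alt A B
instance (A : List Int) (B : List Int) (out : Int) : Decidable (Spec_solution A B out) := by unfold Spec_solution; infer_instance

-- ===== CLAIM (what is proved, stated in full; the proofs are below) =====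
def Claim_equal_solution : Prop := ∀ (A : List Int) (B : List Int), Dom_solution A B → Pre_solution A B → Spec_solution A B (solution A B)

-- ===== LEMMAS AND PROOFS =====
theorem altLoop_nil_left (bs : List Int) (ans : Int) : altLoop [] bs ans = ans := by
  induction bs with
  | nil => rfl
  | cons b bs ih => simpa [altLoop] using ih

-- the two loops agree for ALL lists (sortedness is not even needed for value equality):
-- A's (for a: inner while popping from B) and B's (for b: advance index into A) recursions
-- unfold to the same simultaneous two-pointer recursion.
theorem solOuter_eq_altLoop (bs as : List Int) (ans : Int) :
    solOuter as bs ans = altLoop as bs ans := by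
  induction bs generalizing as ans with
  | nil =>
    cases as with
    | nil => rfl
    | cons a as => simp [solOuter, solInner, altLoop]
  | cons b bs ih =>
    cases as with
    | nil => simp [solOuter, altLoop, altLoop_nil_left]
    | cons a as =>
      simp only [solOuter, solInner, altLoop]
      by_cases h : a < b
      · rw [if_pos h, if_pos h]
        cases bs with
        | nil => simp [altLoop]
        | cons c cs => simpa using ih as (ans + 1)
      · rw [if_neg h, if_neg h]
        cases bs with
        | nil => simp [altLoop]
        | cons c cs =>
          rw [if_neg (by simp : ¬ (c :: cs : List Int) = [])]
          exact ih (a :: as) ans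

-- ===== VERDICT (by name: the statement is the Claim_ definition above) =====
theorem solution_spec : Claim_equal_solution := by
  intro A B _ _
  unfold Spec_solution solution solution_alt
  exact solOuter_eq_altLoop _ _ _
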